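-- pv_equiv track=rewrite | github.com/schanbaek/the_atlas | Codes/util.py | list_basal_jcs
-- ===== SOURCE A (Python) =====
-- def calculate_dist(pair1, pair2):
--     return min(abs(pair1[0]-pair2[0]), abs(pair1[1]-pair2[1]))
--
-- def list_basal_jcs(infos, minss, lastunp, init): # [ (1, 124), (2, 123), ... ]
--     jcpos, dist = [], init
--     for uppair, lowpair in zip(infos[:-1], infos[1:]):
--         jcsize = abs(uppair[0]-lowpair[0])+abs(lowpair[1]-uppair[1])-2
--         if jcsize>=minss:
--             jcpos.append((dist,uppair,jcsize))
--         dist += calculate_dist(uppair, lowpair)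
--     jcpos.append((dist,infos[-1],lastunp))
--     return jcpos
-- ===== SOURCE B (Python) =====
-- def calculate_dist(pair1, pair2):
--     return min(abs(pair1[0]-pair2[0]), abs(pair1[1]-pair2[1]))
--
-- def list_basal_jcs(infos, minss, lastunp, init):
--     # Two-phase decomposition: build an explicit per-pair distance table and a
--     # prefix-sum table 'cum' first, then emit junctions in a second pass.
--     n = len(infos)
--     dists = [calculate_dist(infos[i], infos[i+1]) for i in range(n-1)]
--     cum = [init]
--     for d in dists:
--         cum.append(cum[-1] + d)
--     out = []
--     for i in range(n-1):
--         up, low = infos[i], infos[i+1]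
--         jcsize = abs(up[0]-low[0]) + abs(low[1]-up[1]) - 2
--         if jcsize >= minss:
--             out.append((cum[i], up, jcsize))
--     out.append((cum[-1], infos[-1], lastunp))
--     return out
-- ===== Notes on version B (the rewrite author's own statement) =====
-- stated objective: alternative
-- what changed: A's single accumulate-and-emit loop over zipped neighbours is replaced by a two-phase decomposition: B first materialises a per-pair distance table and an explicit prefix-sum table cum, then a separate index pass emits junctions reading cum[i].
import Mathlib
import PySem

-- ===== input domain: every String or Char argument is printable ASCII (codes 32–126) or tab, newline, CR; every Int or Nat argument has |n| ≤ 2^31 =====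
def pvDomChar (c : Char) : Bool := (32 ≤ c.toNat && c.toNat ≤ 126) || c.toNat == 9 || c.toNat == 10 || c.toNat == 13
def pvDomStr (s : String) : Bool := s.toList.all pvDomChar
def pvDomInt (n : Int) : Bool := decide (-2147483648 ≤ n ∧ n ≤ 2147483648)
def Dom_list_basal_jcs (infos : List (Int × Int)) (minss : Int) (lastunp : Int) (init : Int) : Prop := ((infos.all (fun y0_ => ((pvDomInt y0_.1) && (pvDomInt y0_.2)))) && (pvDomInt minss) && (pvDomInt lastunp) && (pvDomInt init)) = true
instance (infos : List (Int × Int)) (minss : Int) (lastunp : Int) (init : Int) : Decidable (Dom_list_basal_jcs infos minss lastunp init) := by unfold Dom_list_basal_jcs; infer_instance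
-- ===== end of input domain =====

-- B replaces A's single accumulate-and-emit loop by a two-phase decomposition (an explicit
-- per-pair distance table plus a prefix-sum table, then a separate emit pass); same cost.

-- ===== PORT A =====
def calculate_dist (pair1 pair2 : Int × Int) : Int :=
  min |pair1.1 - pair2.1| |pair1.2 - pair2.2|

def list_basal_jcs (infos : List (Int × Int)) (minss : Int) (lastunp : Int) (init : Int) : List (Int × (Int × Int) × Int) :=
  let st :=
    (List.zip (PySem.List.slice infos none (some (-1))) (PySem.List.slice infos (some 1) none)).foldl
      (fun (st : List (Int × (Int × Int) × Int) × Int) pr =>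
        let uppair := pr.1
        let lowpair := pr.2
        let jcsize := |uppair.1 - lowpair.1| + |lowpair.2 - uppair.2| - 2
        let jcpos := if jcsize ≥ minss then st.1 ++ [(st.2, uppair, jcsize)] else st.1
        (jcpos, st.2 + calculate_dist uppair lowpair))
      ([], init)
  match PySem.List.pyGet? infos (-1) with
  | some last => st.1 ++ [(st.2, last, lastunp)]
  | none => st.1   -- Python raises IndexError here (empty infos); excluded by Pre_

-- ===== PORT B =====
def list_basal_jcs_alt (infos : List (Int × Int)) (minss : Int) (lastunp : Int) (init : Int) : List (Int × (Int × Int) × Int) :=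
  let n : Int := infos.length
  let dists := (PySem.List.pyRange 0 (n - 1) 1).map (fun i =>
    calculate_dist (PySem.List.pyGetD infos i (0, 0)) (PySem.List.pyGetD infos (i + 1) (0, 0)))
  let cum := dists.foldl (fun c d => c ++ [PySem.List.pyGetD c (-1) 0 + d]) [init]
  let out := (PySem.List.pyRange 0 (n - 1) 1).foldl
    (fun out i =>
      let up := PySem.List.pyGetD infos i (0, 0)
      let low := PySem.List.pyGetD infos (i + 1) (0, 0)
      let jcsize := |up.1 - low.1| + |low.2 - up.2| - 2
      if jcsize ≥ minss then out ++ [(PySem.List.pyGetD cum i 0, up, jcsize)] else out)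
    []
  match PySem.List.pyGet? infos (-1) with
  | some last => out ++ [(PySem.List.pyGetD cum (-1) 0, last, lastunp)]
  | none => out   -- Python raises IndexError here (empty infos); excluded by Pre_

-- ===== PRECONDITION & SPEC =====
-- Pre_ excludes exactly the empty list, on which Python A raises IndexError at infos[-1].
def Pre_list_basal_jcs (infos : List (Int × Int)) (minss : Int) (lastunp : Int) (init : Int) : Prop := infos ≠ []
instance (infos : List (Int × Int)) (minss : Int) (lastunp : Int) (init : Int) : Decidable (Pre_list_basal_jcs infos minss lastunp init) := by unfold Pre_list_basal_jcs; infer_instance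

def pvWitness_list_basal_jcs : (List (Int × Int)) × Int × Int × Int := ([(1, 124), (2, 123), (5, 110)], 0, 7, 0)

def Spec_list_basal_jcs (infos : List (Int × Int)) (minss : Int) (lastunp : Int) (init : Int) (out : List (Int × (Int × Int) × Int)) : Prop := out = list_basal_jcs_alt infos minss lastunp init
instance (infos : List (Int × Int)) (minss : Int) (lastunp : Int) (init : Int) (out : List (Int × (Int × Int) × Int)) : Decidable (Spec_list_basal_jcs infos minss lastunp init out) := by unfold Spec_list_basal_jcs; infer_instance

-- ===== CLAIM (what is proved, stated in full; the proofs are below) =====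
def Claim_equal_list_basal_jcs : Prop := ∀ (infos : List (Int × Int)) (minss : Int) (lastunp : Int) (init : Int), Dom_list_basal_jcs infos minss lastunp init → Pre_list_basal_jcs infos minss lastunp init → Spec_list_basal_jcs infos minss lastunp init (list_basal_jcs infos minss lastunp init)

-- ===== LEMMAS AND PROOFS =====

-- the list of junctions emitted by the shared loop logic, as a structural recursion
def pvEmit (minss : Int) : List ((Int × Int) × (Int × Int)) → Int → List (Int × (Int × Int) × Int)
  | [], _ => []
  | p :: ps, d =>
    (if |p.1.1 - p.2.1| + |p.2.2 - p.1.2| - 2 ≥ minss then [(d, p.1, |p.1.1 - p.2.1| + |p.2.2 - p.1.2| - 2)] else [])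
      ++ pvEmit minss ps (d + calculate_dist p.1 p.2)

lemma pv_getD_cons_succ {α : Type} (x : α) (xs : List α) (i : Int) (d : α) (hi : 0 ≤ i) :
    PySem.List.pyGetD (x :: xs) (i + 1) d = PySem.List.pyGetD xs i d := by
  lift i to ℕ using hi
  have h : ((i : Int) + 1) = (((i + 1 : Nat) : Int)) := by push_cast; ring
  rw [h, PySem.List.pyGetD_natCast, PySem.List.pyGetD_natCast]
  rfl

lemma pv_getD_cons_cast1 {α : Type} (x : α) (xs : List α) (k : Nat) (d : α) :
    PySem.List.pyGetD (x :: xs) ((k : Int) + 1) d = PySem.List.pyGetD xs (k : Int) d :=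
  pv_getD_cons_succ x xs (k : Int) d (by positivity)

lemma pv_getD_cons_cast2 {α : Type} (x : α) (xs : List α) (k : Nat) (d : α) :
    PySem.List.pyGetD (x :: xs) ((k : Int) + 1 + 1) d = PySem.List.pyGetD xs ((k : Int) + 1) d :=
  pv_getD_cons_succ x xs ((k : Int) + 1) d (by positivity)

lemma pv_A_loop (minss : Int) (P : List ((Int × Int) × (Int × Int))) :
    ∀ (acc : List (Int × (Int × Int) × Int)) (d : Int),
    P.foldl
      (fun (st : List (Int × (Int × Int) × Int) × Int) pr =>
        let uppair := pr.1
        let lowpair := pr.2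
        let jcsize := |uppair.1 - lowpair.1| + |lowpair.2 - uppair.2| - 2
        let jcpos := if jcsize ≥ minss then st.1 ++ [(st.2, uppair, jcsize)] else st.1
        (jcpos, st.2 + calculate_dist uppair lowpair))
      (acc, d)
    = (acc ++ pvEmit minss P d, d + (P.map (fun p => calculate_dist p.1 p.2)).sum) := by
  induction P with
  | nil => intro acc d; simp [pvEmit]
  | cons p ps ih =>
    intro acc d
    simp only [List.foldl_cons, List.map_cons, List.sum_cons, pvEmit]
    rw [ih]
    split_ifs with h <;> simp <;> ring_nf

lemma pv_cum_eq (ds : List Int) :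
    ∀ (c : List Int) (a : Int),
    ds.foldl (fun c d => c ++ [PySem.List.pyGetD c (-1) 0 + d]) (c ++ [a]) = c ++ List.scanl (· + ·) a ds := by
  induction ds with
  | nil => intro c a; simp
  | cons d ds ih =>
    intro c a
    simp only [List.foldl_cons, PySem.List.pyGetD_neg_one_append_singleton]
    rw [ih (c ++ [a]) (a + d)]
    simp [List.scanl_cons]

lemma pv_cum_eq' (ds : List Int) (a : Int) :
    ds.foldl (fun c d => c ++ [PySem.List.pyGetD c (-1) 0 + d]) [a] = List.scanl (· + ·) a ds := by
  simpa using pv_cum_eq ds [] a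

lemma pv_scanl_last (ds : List Int) :
    ∀ (a : Int), PySem.List.pyGetD (List.scanl (· + ·) a ds) (-1) 0 = a + ds.sum := by
  induction ds with
  | nil =>
    intro a
    simpa using PySem.List.pyGetD_neg_one_append_singleton ([] : List Int) a 0
  | cons d ds ih =>
    intro a
    have hmain := ih (a + d)
    have hne : List.scanl (· + ·) (a + d) ds ≠ [] := by
      cases ds <;> simp [List.scanl_cons]
    rw [List.scanl_cons]
    rw [PySem.List.pyGetD_neg_one _ 0 (by simp), List.getLast_cons hne]
    rw [PySem.List.pyGetD_neg_one _ 0 hne] at hmain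
    rw [hmain]
    simp [List.sum_cons]
    ring

lemma pv_index_pairs {β : Type} (f : (Int × Int) → (Int × Int) → β) :
    ∀ (l : List (Int × Int)),
    (PySem.List.pyRange 0 ((l.length : Int) - 1) 1).map (fun i =>
      f (PySem.List.pyGetD l i (0, 0)) (PySem.List.pyGetD l (i + 1) (0, 0)))
    = (List.zip l.dropLast l.tail).map (fun p => f p.1 p.2) := by
  intro l
  induction l with
  | nil => rw [PySem.List.pyRange_one_eq_nil (by simp)]; rfl
  | cons x xs ih =>
    match xs with
    | [] => rw [PySem.List.pyRange_one_eq_nil (by simp)]; rfl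
    | y :: rest =>
      have hm : (((x :: y :: rest).length : Int) - 1) = ((rest.length + 1 : Nat) : Int) := by
        push_cast [List.length_cons]; ring
      have hm2 : (((y :: rest).length : Int) - 1) = ((rest.length : Nat) : Int) := by
        simp
      rw [hm, PySem.List.pyRange_zero_natCast, List.range_succ_eq_map]
      rw [hm2, PySem.List.pyRange_zero_natCast] at ih
      simp only [List.map_cons, List.map_map] at ih ⊢
      rw [show (x :: y :: rest).tail = y :: rest from rfl, List.dropLast_cons₂,
          List.zip_cons_cons, List.map_cons]
      congr 1
      · rw [show ((0 : ℕ) : Int) = 0 from rfl]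
        rw [pv_getD_cons_succ x (y :: rest) 0 (0, 0) le_rfl]
        rw [PySem.List.pyGetD_zero_cons, PySem.List.pyGetD_zero_cons]
      · simp only [List.tail_cons] at ih
        rw [← ih]
        apply List.map_congr_left
        intro k hk
        simp only [Function.comp_apply]
        rw [show ((Nat.succ k : ℕ) : Int) = (k : Int) + 1 by push_cast; ring]
        rw [pv_getD_cons_succ x (y :: rest) ((k : Int)) (0, 0) (by positivity),
            pv_getD_cons_succ x (y :: rest) ((k : Int) + 1) (0, 0) (by positivity)]

lemma pv_B_loop (minss : Int) :
    ∀ (l : List (Int × Int)) (d : Int) (acc : List (Int × (Int × Int) × Int)),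
    (PySem.List.pyRange 0 ((l.length : Int) - 1) 1).foldl
      (fun out i =>
        let up := PySem.List.pyGetD l i (0, 0)
        let low := PySem.List.pyGetD l (i + 1) (0, 0)
        let jcsize := |up.1 - low.1| + |low.2 - up.2| - 2
        if jcsize ≥ minss then
          out ++ [(PySem.List.pyGetD (List.scanl (· + ·) d ((List.zip l.dropLast l.tail).map (fun p => calculate_dist p.1 p.2))) i 0, up, jcsize)]
        else out)
      acc
    = acc ++ pvEmit minss (List.zip l.dropLast l.tail) d := by
  intro l
  induction l with
  | nil => intro d acc; rw [PySem.List.pyRange_one_eq_nil (by simp)]; simp [pvEmit]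
  | cons x xs ih =>
    match xs with
    | [] => intro d acc; rw [PySem.List.pyRange_one_eq_nil (by simp)]; simp [pvEmit]
    | y :: rest =>
      intro d acc
      have hm : (((x :: y :: rest).length : Int) - 1) = ((rest.length + 1 : Nat) : Int) := by
        push_cast [List.length_cons]; ring
      have hm2 : (((y :: rest).length : Int) - 1) = ((rest.length : Nat) : Int) := by simp
      rw [hm, PySem.List.pyRange_zero_natCast, List.range_succ_eq_map]
      simp only [List.tail_cons, List.dropLast_cons₂, List.zip_cons_cons, List.map_cons,
        List.scanl_cons, List.foldl_cons, List.foldl_map, Nat.succ_eq_add_one, Nat.cast_add,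
        Nat.cast_one, Nat.cast_zero, PySem.List.pyGetD_zero_cons, pvEmit]
      have h01 : PySem.List.pyGetD (x :: y :: rest) ((0 : Int) + 1) ((0 : Int), (0 : Int)) = y := by
        rw [pv_getD_cons_succ x (y :: rest) 0 (0, 0) le_rfl, PySem.List.pyGetD_zero_cons]
      simp only [h01, pv_getD_cons_cast1, pv_getD_cons_cast2]
      simp only [hm2, PySem.List.pyRange_zero_natCast, List.foldl_map, List.tail_cons,
        pv_getD_cons_cast1] at ih
      split_ifs with h
      · rw [ih (d + calculate_dist x y) (acc ++ [(d, x, |x.1 - y.1| + |y.2 - x.2| - 2)])]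
        simp [List.append_assoc]
      · rw [ih (d + calculate_dist x y) acc]
        simp

-- ===== VERDICT (by name: the statement is the Claim_ definition above) =====
theorem list_basal_jcs_spec : Claim_equal_list_basal_jcs := by
  intro infos minss lastunp init _ hpre
  obtain ⟨z, zs, rfl⟩ : ∃ z zs, infos = z :: zs := by
    cases infos with
    | nil => exact absurd rfl hpre
    | cons z zs => exact ⟨z, zs, rfl⟩
  show list_basal_jcs (z :: zs) minss lastunp init = list_basal_jcs_alt (z :: zs) minss lastunp init
  simp only [list_basal_jcs, list_basal_jcs_alt]
  rw [PySem.List.slice_to_neg_one, PySem.List.slice_from_one, pv_A_loop]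
  simp only [pv_index_pairs calculate_dist (z :: zs), pv_cum_eq']
  rw [pv_B_loop, PySem.List.pyGet?_neg_one, pv_scanl_last]
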